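-- pv_equiv track=rewrite | github.com/hotkyou/MahjongImageGetter | backend/shanten.py | convert_tiles_to_strings
-- ===== SOURCE A (Python) =====
-- def convert_tiles_to_strings(paiList):
--     """
--     麻雀牌の配列を萬子・筒子・索子・字牌の文字列に変換する
--
--     Args:
--         tiles (list): 麻雀牌の配列 (例: ['m3', 'm5', 'p3', 'p4', 'p0', ...])
--
--     Returns:
--         tuple: (man, pin, sou, honors) の形式で各種牌の文字列を返す
--     """
--     # 種類ごとの辞書を初期化
--     categorized = {
--         'm': [],  # 萬子
--         'p': [],  # 筒子
--         's': [],  # 索子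
--         'z': []   # 字牌
--     }
--
--     # 牌を種類ごとに分類
--     for tile in paiList:
--         tile_type = tile[0]    # 牌の種類 (m/p/s/z)
--         number = tile[1]       # 数字
--
--         # 赤ドラ(0)を5に変換
--         if number == '0':
--             number = '5'
--
--         categorized[tile_type].append(number)
--
--     # それぞれの種類でソートして文字列に変換
--     man = ''.join(sorted(categorized['m']))
--     pin = ''.join(sorted(categorized['p']))
--     sou = ''.join(sorted(categorized['s']))
--     honors = ''.join(sorted(categorized['z']))
--
--     return man, pin, sou, honors
-- ===== SOURCE B (Python) =====
-- def convert_tiles_to_strings(paiList):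
--     # Counting sort: one pass tallies (suit, rank) pairs; each output string is
--     # rebuilt by scanning the fixed character range in order.
--     counts = {}
--     for tile in paiList:
--         c = tile[1]
--         if c == '0':
--             c = '5'
--         key = (tile[0], c)
--         counts[key] = counts.get(key, 0) + 1
--
--     def emit(s):
--         return ''.join(chr(i) * counts.get((s, chr(i)), 0) for i in range(128))
--
--     return emit('m'), emit('p'), emit('s'), emit('z')
-- ===== Notes on version B (the rewrite author's own statement) =====
-- stated objective: alternative
-- what changed: Replaces per-suit bucket lists plus Python's comparison sort with a single-pass (suit, rank) counter and a counting-sort emission that rebuilds each string by scanning the fixed character range in order.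
import Mathlib
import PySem

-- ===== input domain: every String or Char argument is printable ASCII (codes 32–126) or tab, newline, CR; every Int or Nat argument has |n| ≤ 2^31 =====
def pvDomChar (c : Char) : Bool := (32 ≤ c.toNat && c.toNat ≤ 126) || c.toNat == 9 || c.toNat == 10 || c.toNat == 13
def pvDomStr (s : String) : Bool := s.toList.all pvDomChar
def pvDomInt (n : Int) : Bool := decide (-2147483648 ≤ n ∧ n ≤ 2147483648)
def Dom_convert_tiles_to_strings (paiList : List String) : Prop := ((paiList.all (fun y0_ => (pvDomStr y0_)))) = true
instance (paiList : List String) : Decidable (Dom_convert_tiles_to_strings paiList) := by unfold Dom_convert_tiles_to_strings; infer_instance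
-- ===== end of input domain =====

-- B replaces "bucket lists then comparison sort" by a one-pass (suit, rank) counter
-- followed by a counting-sort emission over the fixed character range (objective: alternative).

-- ===== PORT A =====
def convert_tiles_to_strings (paiList : List String) : String × String × String × String :=
  let categorized : PySem.Dict Char (List Char) :=
    PySem.Dict.ofList [('m', []), ('p', []), ('s', []), ('z', [])]
  let categorized := paiList.foldl (fun d tile =>
    let tile_type := PySem.List.pyGetD tile.toList 0 ' '   -- tile[0]; exact under Pre_ (len ≥ 2)
    let number := PySem.List.pyGetD tile.toList 1 ' '      -- tile[1]; exact under Pre_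
    let number := if number = '0' then '5' else number
    d.modify tile_type [] (fun l => l ++ [number])) categorized  -- categorized[tile_type].append(number); KeyError excluded by Pre_
  let man := String.ofList (PySem.List.sorted (categorized.getD 'm' []) (fun x => x) false)
  let pin := String.ofList (PySem.List.sorted (categorized.getD 'p' []) (fun x => x) false)
  let sou := String.ofList (PySem.List.sorted (categorized.getD 's' []) (fun x => x) false)
  let honors := String.ofList (PySem.List.sorted (categorized.getD 'z' []) (fun x => x) false)
  (man, pin, sou, honors)

-- ===== PORT B =====
-- emit(s): ''.join(chr(i) * counts.get((s, chr(i)), 0) for i in range(128))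
def pvEmit (counts : PySem.Dict (Char × Char) Int) (s : Char) : String :=
  String.ofList ((PySem.List.pyRange 0 128 1).flatMap (fun i =>
    List.replicate (counts.getD (s, Char.ofNat i.toNat) 0).toNat (Char.ofNat i.toNat)))

def convert_tiles_to_strings_alt (paiList : List String) : String × String × String × String :=
  let counts := paiList.foldl (fun d tile =>
    let c := PySem.List.pyGetD tile.toList 1 ' '           -- tile[1]
    let c := if c = '0' then '5' else c
    let key := (PySem.List.pyGetD tile.toList 0 ' ', c)    -- (tile[0], c)
    d.insert key (d.getD key 0 + 1)) (PySem.Dict.empty : PySem.Dict (Char × Char) Int)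
  (pvEmit counts 'm', pvEmit counts 'p', pvEmit counts 's', pvEmit counts 'z')

-- ===== PRECONDITION & SPEC =====
-- Pre_ excludes exactly the inputs on which A raises: a tile shorter than 2 characters
-- (IndexError on tile[1] or tile[0]) or whose first character is not one of m/p/s/z (KeyError).
def Pre_convert_tiles_to_strings (paiList : List String) : Prop :=
  ∀ tile ∈ paiList, 2 ≤ tile.toList.length ∧
    tile.toList.getD 0 ' ' ∈ (['m', 'p', 's', 'z'] : List Char)
instance (paiList : List String) : Decidable (Pre_convert_tiles_to_strings paiList) := by
  unfold Pre_convert_tiles_to_strings; infer_instance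

def pvWitness_convert_tiles_to_strings : List String := ["m3", "p0", "m1", "z7"]

def Spec_convert_tiles_to_strings (paiList : List String) (out : String × String × String × String) : Prop := out = convert_tiles_to_strings_alt paiList
instance (paiList : List String) (out : String × String × String × String) : Decidable (Spec_convert_tiles_to_strings paiList out) := by unfold Spec_convert_tiles_to_strings; infer_instance

-- ===== CLAIM (what is proved, stated in full; the proofs are below) =====
def Claim_equal_convert_tiles_to_strings : Prop := ∀ (paiList : List String), Dom_convert_tiles_to_strings paiList → Pre_convert_tiles_to_strings paiList → Spec_convert_tiles_to_strings paiList (convert_tiles_to_strings paiList)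

-- ===== LEMMAS AND PROOFS =====

-- the (suit, converted rank) pair a tile contributes
def pvPairOf (tile : String) : Char × Char :=
  (PySem.List.pyGetD tile.toList 0 ' ',
   let n := PySem.List.pyGetD tile.toList 1 ' '
   if n = '0' then '5' else n)

-- the converted-rank list A collects for suit t
def pvCat (paiList : List String) (t : Char) : List Char :=
  ((paiList.map pvPairOf).filter (fun p => p.1 == t)).map (fun p => p.2)

theorem pvChar_toNat_ofNat (n : Nat) (h : n < 128) : (Char.ofNat n).toNat = n := by
  have hv : n.isValidChar := Or.inl (by omega)
  rw [Char.ofNat, dif_pos hv]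
  rfl

theorem pvChar_le_of_toNat_le (a b : Char) (h : a.toNat ≤ b.toNat) : a ≤ b := by
  rw [Char.le_def]; exact_mod_cast h

-- counting over an initial segment of the character table
theorem pvCanon_count (n : Nat) (hn : n ≤ 128) (l : List Char) (c : Char) :
    (((List.range n).flatMap (fun i =>
        List.replicate (l.count (Char.ofNat i)) (Char.ofNat i))).count c)
      = if c.toNat < n then l.count c else 0 := by
  induction n with
  | zero => simp
  | succ m ih =>
    rw [List.range_succ, List.flatMap_append, List.count_append,
        ih (by omega), List.flatMap_cons, List.flatMap_nil, List.append_nil,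
        List.count_replicate]
    have hm : (Char.ofNat m).toNat = m := pvChar_toNat_ofNat m (by omega)
    by_cases hc : c = Char.ofNat m
    · subst hc
      rw [hm]
      simp
    · have hne : c.toNat ≠ m := by
        intro h
        apply hc
        rw [← Char.ofNat_toNat c, h]
      have hbeq : (Char.ofNat m == c) = false :=
        beq_eq_false_iff_ne.mpr (fun h => hc h.symm)
      rw [hbeq]
      simp only [Bool.false_eq_true, if_false, Nat.add_zero]
      by_cases h1 : c.toNat < m
      · rw [if_pos h1, if_pos (by omega)]
      · rw [if_neg h1, if_neg (by omega)]

theorem pvCanon_pairwise (n : Nat) (hn : n ≤ 128) (l : List Char) :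
    ((List.range n).flatMap (fun i =>
        List.replicate (l.count (Char.ofNat i)) (Char.ofNat i))).Pairwise (· ≤ ·) := by
  rw [List.pairwise_flatMap]
  constructor
  · intro a _
    rw [List.pairwise_replicate]
    right; exact le_refl _
  · have := List.pairwise_lt_range (n := n)
    refine this.imp_of_mem ?_
    intro i j hi hj hij x hx y hy
    have hxi : x = Char.ofNat i := List.eq_of_mem_replicate hx
    have hyj : y = Char.ofNat j := List.eq_of_mem_replicate hy
    subst hxi; subst hyj
    apply pvChar_le_of_toNat_le
    rw [pvChar_toNat_ofNat i (by have := List.mem_range.mp hi; omega),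
        pvChar_toNat_ofNat j (by have := List.mem_range.mp hj; omega)]
    have := List.mem_range.mp hj
    omega

-- counting sort agrees with comparison sort on sub-128 characters
theorem pvCanon_eq_sorted (l : List Char) (hl : ∀ c ∈ l, c.toNat < 128) :
    (List.range 128).flatMap (fun i =>
        List.replicate (l.count (Char.ofNat i)) (Char.ofNat i))
      = PySem.List.sorted l (fun x => x) false := by
  symm
  apply PySem.List.sorted_id_eq_of_perm_of_pairwise
  · rw [List.perm_iff_count]
    intro c
    rw [pvCanon_count 128 (le_refl _) l c]
    by_cases hc : c.toNat < 128
    · rw [if_pos hc]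
    · rw [if_neg hc]
      symm
      rw [List.count_eq_zero]
      intro hmem
      exact hc (hl c hmem)
  · exact pvCanon_pairwise 128 (le_refl _) l

-- counting pairs = counting ranks within a suit
theorem pvCount_pair (L : List (Char × Char)) (t c : Char) :
    L.count (t, c) = ((L.filter (fun p => p.1 == t)).map (fun p => p.2)).count c := by
  induction L with
  | nil => simp
  | cons p L ih =>
    obtain ⟨a, b⟩ := p
    by_cases ha : a = t
    · subst ha
      by_cases hb : b = c
      · subst hb; simp [ih]
      · simp [ih, hb, Prod.ext_iff]
    · simp [ih, ha, Prod.ext_iff]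

-- A's bucket for suit t is pvCat
theorem pvA_bucket (paiList : List String) (t : Char) (ht : t ∈ (['m','p','s','z'] : List Char)) :
    (paiList.foldl (fun d tile =>
        let tile_type := PySem.List.pyGetD tile.toList 0 ' '
        let number := PySem.List.pyGetD tile.toList 1 ' '
        let number := if number = '0' then '5' else number
        d.modify tile_type [] (fun l => l ++ [number]))
      (PySem.Dict.ofList [('m', []), ('p', []), ('s', []), ('z', [])])).getD t []
      = pvCat paiList t := by
  have h1 : (paiList.foldl (fun d tile =>
        let tile_type := PySem.List.pyGetD tile.toList 0 ' '
        let number := PySem.List.pyGetD tile.toList 1 ' '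
        let number := if number = '0' then '5' else number
        d.modify tile_type [] (fun l => l ++ [number]))
      (PySem.Dict.ofList [('m', []), ('p', []), ('s', []), ('z', [])]))
      = ((paiList.map pvPairOf).foldl (fun d p => d.modify p.1 [] (fun l => l ++ [p.2]))
          (PySem.Dict.ofList [('m', []), ('p', []), ('s', []), ('z', [])])) := by
    rw [List.foldl_map]
    rfl
  rw [h1, PySem.Dict.getD_foldl_modify_append]
  have h2 : (PySem.Dict.ofList [('m', ([] : List Char)), ('p', []), ('s', []), ('z', [])]).getD t [] = [] := by
    fin_cases ht <;> decide
  rw [h2, List.nil_append]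
  rfl

-- B's counter is Counter of the (suit, rank) pairs
theorem pvB_dict (paiList : List String) :
    (paiList.foldl (fun d tile =>
        let c := PySem.List.pyGetD tile.toList 1 ' '
        let c := if c = '0' then '5' else c
        let key := (PySem.List.pyGetD tile.toList 0 ' ', c)
        d.insert key (d.getD key 0 + 1)) (PySem.Dict.empty : PySem.Dict (Char × Char) Int))
      = PySem.Dict.counter (paiList.map pvPairOf) := by
  have h1 : (paiList.foldl (fun d tile =>
        let c := PySem.List.pyGetD tile.toList 1 ' '
        let c := if c = '0' then '5' else c
        let key := (PySem.List.pyGetD tile.toList 0 ' ', c)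
        d.insert key (d.getD key 0 + 1)) (PySem.Dict.empty : PySem.Dict (Char × Char) Int))
      = (paiList.map (fun tile => (PySem.List.pyGetD tile.toList 0 ' ',
            let n := PySem.List.pyGetD tile.toList 1 ' '
            if n = '0' then '5' else n))).foldl
          (fun d x => d.insert x (d.getD x 0 + 1)) (PySem.Dict.empty : PySem.Dict (Char × Char) Int) := by
    rw [List.foldl_map]
  rw [h1, PySem.Dict.foldl_insert_getD_add_one_eq_counter]
  rfl

-- every converted rank is a sub-128 character under Dom and Pre_
theorem pvCat_lt_128 (paiList : List String) (hdom : Dom_convert_tiles_to_strings paiList)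
    (hpre : Pre_convert_tiles_to_strings paiList) :
    ∀ t, ∀ c ∈ pvCat paiList t, c.toNat < 128 := by
  intro t c hc
  unfold pvCat at hc
  obtain ⟨p, hp, rfl⟩ := List.mem_map.mp hc
  obtain ⟨hpmem, _⟩ := List.mem_filter.mp hp
  obtain ⟨tile, htile, rfl⟩ := List.mem_map.mp hpmem
  have hlen := (hpre tile htile).1
  have hdomtile : pvDomStr tile = true := by
    unfold Dom_convert_tiles_to_strings at hdom
    exact List.all_eq_true.mp hdom tile htile
  unfold pvPairOf
  simp only
  by_cases h0 : PySem.List.pyGetD tile.toList 1 ' ' = '0'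
  · rw [if_pos h0]; decide
  · rw [if_neg h0]
    have hmem : PySem.List.pyGetD tile.toList 1 ' ' ∈ tile.toList :=
      PySem.List.pyGetD_mem tile.toList ' ' (by constructor <;> omega)
    have := List.all_eq_true.mp hdomtile _ hmem
    unfold pvDomChar at this
    simp only [Bool.or_eq_true, Bool.and_eq_true, decide_eq_true_eq, beq_iff_eq] at this
    omega

-- emit equals A's sorted bucket string
theorem pvEmit_eq (paiList : List String) (hdom : Dom_convert_tiles_to_strings paiList)
    (hpre : Pre_convert_tiles_to_strings paiList) (t : Char) :
    pvEmit (paiList.foldl (fun d tile =>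
        let c := PySem.List.pyGetD tile.toList 1 ' '
        let c := if c = '0' then '5' else c
        let key := (PySem.List.pyGetD tile.toList 0 ' ', c)
        d.insert key (d.getD key 0 + 1)) (PySem.Dict.empty : PySem.Dict (Char × Char) Int)) t
      = String.ofList (PySem.List.sorted (pvCat paiList t) (fun x => x) false) := by
  unfold pvEmit
  rw [pvB_dict]
  congr 1
  have hrange : PySem.List.pyRange 0 128 1 = (List.range 128).map (fun k : Nat => (0 : Int) + (k : Int)) := by
    rw [PySem.List.pyRange_one]
    norm_num
    rfl
  rw [hrange, List.flatMap_map, List.flatMap_def]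
  have hbody : ∀ i ∈ List.range 128,
      List.replicate ((PySem.Dict.counter (paiList.map pvPairOf)).getD
          (t, Char.ofNat (((0 : Int) + (i : Int)).toNat)) 0).toNat
        (Char.ofNat (((0 : Int) + (i : Int)).toNat))
      = List.replicate ((pvCat paiList t).count (Char.ofNat i)) (Char.ofNat i) := by
    intro i _
    have hcast : (((0 : Int) + (i : Int)).toNat) = i := by omega
    rw [hcast, PySem.Dict.getD_counter, pvCount_pair]
    rw [Int.toNat_natCast]
    rfl
  rw [List.map_congr_left hbody]
  rw [← List.flatMap_def]
  exact pvCanon_eq_sorted (pvCat paiList t) (pvCat_lt_128 paiList hdom hpre t)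

-- ===== VERDICT (by name: the statement is the Claim_ definition above) =====
theorem convert_tiles_to_strings_spec : Claim_equal_convert_tiles_to_strings := by
  intro paiList hdom hpre
  unfold Spec_convert_tiles_to_strings convert_tiles_to_strings convert_tiles_to_strings_alt
  simp only
  rw [pvA_bucket paiList 'm' (by decide), pvA_bucket paiList 'p' (by decide),
      pvA_bucket paiList 's' (by decide), pvA_bucket paiList 'z' (by decide),
      pvEmit_eq paiList hdom hpre 'm', pvEmit_eq paiList hdom hpre 'p',
      pvEmit_eq paiList hdom hpre 's', pvEmit_eq paiList hdom hpre 'z']
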